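-- pv_equiv track=rewrite | github.com/mirdep/GetRichBOT | decodeSignalList.py | getAsset
-- ===== SOURCE A (Python) =====
-- assetsList = ['EUR', 'USD', 'JPY', 'GBP', 'CAD', 'AUD', 'NZD', 'CHF']
--
-- def getAsset(info):
--     asset = None
--     asset1 = None
--     asset2 = None
--     for i in range(len(assetsList)):
--         if info.find(assetsList[i]) != -1:
--             asset1 = i
--             break
--     for i in range(len(assetsList)):
--         if i != asset1 and info.find(assetsList[i]) != -1:
--             asset2 = i
--             break
--
--     if asset1 != None and asset2 != None:
--         if info.index(assetsList[asset1]) < info.index(assetsList[asset2]):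
--             asset = assetsList[asset1] + assetsList[asset2]
--         else:
--             asset = assetsList[asset2] + assetsList[asset1]
--         if info.find('OTC') != -1:
--             asset += '-OTC'
--     return asset
-- ===== SOURCE B (Python) =====
-- assetsList = ['EUR', 'USD', 'JPY', 'GBP', 'CAD', 'AUD', 'NZD', 'CHF']
--
-- def getAsset(info):
--     # Single left-to-right scan of the STRING: every 3-char window is tested
--     # against the code set, so codes are collected in order of first appearance
--     # and the OTC marker is spotted in the same pass.
--     codes = set(assetsList)
--     seen = []          # codes in order of first appearance in info
--     otc = False
--     for i in range(len(info) - 2):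
--         w = info[i:i+3]
--         if w == 'OTC':
--             otc = True
--         elif w in codes and w not in seen:
--             seen.append(w)
--     if len(seen) < 2:
--         return None
--     pair = sorted(seen, key=assetsList.index)[:2]
--     asset = ''.join(c for c in seen if c in pair)
--     return asset + '-OTC' if otc else asset
-- ===== Notes on version B (the rewrite author's own statement) =====
-- stated objective: alternative
-- what changed: A makes two early-breaking passes over the currency-code list (info.find per code) plus info.index calls; B instead scans the string once, testing each 3-char window against the code set, collecting present codes in order of first appearance (which already encodes the position comparison) and spotting the OTC marker in the same pass.
import Mathlib
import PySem

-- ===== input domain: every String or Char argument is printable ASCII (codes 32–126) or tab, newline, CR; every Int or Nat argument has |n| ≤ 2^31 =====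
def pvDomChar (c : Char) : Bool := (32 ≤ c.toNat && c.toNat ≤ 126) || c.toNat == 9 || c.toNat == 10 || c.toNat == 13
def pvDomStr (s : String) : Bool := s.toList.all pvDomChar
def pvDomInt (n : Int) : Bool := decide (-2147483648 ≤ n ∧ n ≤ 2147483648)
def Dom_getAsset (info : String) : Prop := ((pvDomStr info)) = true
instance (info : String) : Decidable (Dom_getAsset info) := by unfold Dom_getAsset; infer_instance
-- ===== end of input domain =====

-- B replaces A's scans over the code list by one left-to-right scan of the STRING's 3-char
-- windows that collects the present codes in order of first appearance (objective: alternative).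

-- ===== PORT A =====
def assetsList : List String := ["EUR", "USD", "JPY", "GBP", "CAD", "AUD", "NZD", "CHF"]

-- first loop: for i in range(len(assetsList)): if info.find(assetsList[i]) != -1: asset1 = i; break
def loop1A (info : String) : List Int → Option Int
  | [] => none
  | i :: rest =>
    if PySem.Str.find info (PySem.List.pyGetD assetsList i "") ≠ -1 then some i
    else loop1A info rest

-- second loop: for i in range(len(assetsList)): if i != asset1 and info.find(assetsList[i]) != -1: asset2 = i; break
def loop2A (info : String) (asset1 : Option Int) : List Int → Option Int
  | [] => none
  | i :: rest =>
    if some i ≠ asset1 ∧ PySem.Str.find info (PySem.List.pyGetD assetsList i "") ≠ -1 then some i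
    else loop2A info asset1 rest

def getAsset (info : String) : Option String :=
  let asset1 := loop1A info (PySem.List.pyRange 0 (assetsList.length : Int) 1)
  let asset2 := loop2A info asset1 (PySem.List.pyRange 0 (assetsList.length : Int) 1)
  match asset1, asset2 with
  | some i, some j =>
    let s1 := PySem.List.pyGetD assetsList i ""
    let s2 := PySem.List.pyGetD assetsList j ""
    -- info.index(sub) ported as PySem.Str.find: exact here, both substrings were just found present
    let asset := if PySem.Str.find info s1 < PySem.Str.find info s2 then s1 ++ s2 else s2 ++ s1
    some (if PySem.Str.find info "OTC" ≠ -1 then asset ++ "-OTC" else asset)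
  | _, _ => none

-- ===== PORT B =====
-- loop body: w = info[i:i+3]; if w == 'OTC': otc = True
--            elif w in codes and w not in seen: seen.append(w)
def scanStep (info : String) (st : List String × Bool) (i : Int) : List String × Bool :=
  let w := PySem.Str.slice info (some i) (some (i + 3))
  if w = "OTC" then (st.1, true)
  else if PySem.Set.contains (PySem.Set.ofList assetsList) w = true ∧ w ∉ st.1 then
    (st.1 ++ [w], st.2)
  else st

def getAsset_alt (info : String) : Option String :=
  let st := (PySem.List.pyRange 0 (PySem.Str.len info - 2) 1).foldl (scanStep info) ([], false)
  if st.1.length < 2 then none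
  else
    let pair := PySem.List.slice
      (PySem.List.sorted st.1 (fun c => (PySem.List.index? assetsList c).getD 0) false)
      none (some 2)
    let asset := PySem.Str.join "" (st.1.filter (fun c => c ∈ pair))
    if st.2 then some (asset ++ "-OTC") else some asset

-- ===== PRECONDITION & SPEC =====
def Spec_getAsset (info : String) (out : Option String) : Prop := out = getAsset_alt info
instance (info : String) (out : Option String) : Decidable (Spec_getAsset info out) := by unfold Spec_getAsset; infer_instance

-- ===== CLAIM (what is proved, stated in full; the proofs are below) =====
def Claim_equal_getAsset : Prop := ∀ (info : String), Dom_getAsset info → Spec_getAsset info (getAsset info)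

-- ===== LEMMAS AND PROOFS =====

-- the two present codes A picks: first two, in assetsList order
def pickPair (info : String) : Option (String × String) :=
  match assetsList.filter (fun c => PySem.Str.isIn c info) with
  | a :: b :: _ => some (a, b)
  | _ => none

def pairOut (info : String) (a b : String) : String :=
  let s := if PySem.Str.find info a < PySem.Str.find info b then a ++ b else b ++ a
  if PySem.Str.isIn "OTC" info then s ++ "-OTC" else s

theorem find_ne_iff_isIn (info c : String) :
    (PySem.Str.find info c ≠ -1) ↔ (PySem.Str.isIn c info = true) := by
  rw [PySem.Str.find_ne_neg_one_iff, PySem.Str.isIn_iff_infix]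

theorem range8 : PySem.List.pyRange 0 ((assetsList.length : Nat) : Int) 1 = [0,1,2,3,4,5,6,7] := by
  decide

set_option maxHeartbeats 4000000 in
theorem A_char (info : String) :
    getAsset info = (pickPair info).map (fun p => pairOut info p.1 p.2) := by
  have g0 : PySem.List.pyGetD ["EUR", "USD", "JPY", "GBP", "CAD", "AUD", "NZD", "CHF"] 0 "" = "EUR" := by decide
  have g1 : PySem.List.pyGetD ["EUR", "USD", "JPY", "GBP", "CAD", "AUD", "NZD", "CHF"] 1 "" = "USD" := by decide
  have g2 : PySem.List.pyGetD ["EUR", "USD", "JPY", "GBP", "CAD", "AUD", "NZD", "CHF"] 2 "" = "JPY" := by decide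
  have g3 : PySem.List.pyGetD ["EUR", "USD", "JPY", "GBP", "CAD", "AUD", "NZD", "CHF"] 3 "" = "GBP" := by decide
  have g4 : PySem.List.pyGetD ["EUR", "USD", "JPY", "GBP", "CAD", "AUD", "NZD", "CHF"] 4 "" = "CAD" := by decide
  have g5 : PySem.List.pyGetD ["EUR", "USD", "JPY", "GBP", "CAD", "AUD", "NZD", "CHF"] 5 "" = "AUD" := by decide
  have g6 : PySem.List.pyGetD ["EUR", "USD", "JPY", "GBP", "CAD", "AUD", "NZD", "CHF"] 6 "" = "NZD" := by decide
  have g7 : PySem.List.pyGetD ["EUR", "USD", "JPY", "GBP", "CAD", "AUD", "NZD", "CHF"] 7 "" = "CHF" := by decide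
  unfold getAsset pickPair pairOut
  rw [range8]
  cases h1 : PySem.Str.isIn "EUR" info <;>
  cases h2 : PySem.Str.isIn "USD" info <;>
  cases h3 : PySem.Str.isIn "JPY" info <;>
  cases h4 : PySem.Str.isIn "GBP" info <;>
  cases h5 : PySem.Str.isIn "CAD" info <;>
  cases h6 : PySem.Str.isIn "AUD" info <;>
  cases h7 : PySem.Str.isIn "NZD" info <;>
  cases h8 : PySem.Str.isIn "CHF" info <;>
  simp only [loop1A, loop2A, assetsList, List.filter_cons, List.filter_nil,
    g0, g1, g2, g3, g4, g5, g6, g7, find_ne_iff_isIn,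
    h1, h2, h3, h4, h5, h6, h7, h8, Option.map_some, Option.map_none,
    Bool.false_eq_true, ne_eq, Option.some.injEq, reduceCtorEq,
    not_false_eq_true, not_true_eq_false, and_true, and_false, Int.reduceEq, reduceIte]


theorem window_eq_iff (info : String) (c : String) (hc : c.toList.length = 3) (k : Nat) :
    (PySem.Str.slice info (some (k : Int)) (some ((k : Int) + 3)) = c) ↔
      c.toList <+: info.toList.drop k := by
  rw [← String.toList_inj, PySem.Str.toList_slice, PySem.Chars.slice_eq_listSlice,
    PySem.List.slice_toNat _ (by positivity) (by positivity), List.prefix_iff_eq_take, hc]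
  have : ((k : Int) + 3).toNat - (k : Int).toNat = 3 := by omega
  rw [this, Int.toNat_natCast]
  exact ⟨fun h => h.symm, fun h => h.symm⟩

theorem find_bounds_of_prefix_drop (cs sub : List Char) (k : Nat) (h : sub <+: cs.drop k) :
    0 ≤ PySem.Chars.find cs sub ∧ (PySem.Chars.find cs sub).toNat ≤ k := by
  have h0 : 0 ≤ PySem.Chars.find cs sub :=
    (PySem.Chars.find_nonneg_iff cs sub).mpr (h.isInfix.trans (List.drop_suffix k cs).isInfix)
  refine ⟨h0, ?_⟩
  by_contra hlt
  exact (PySem.Chars.find_spec h0).2 k (by omega) h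

theorem find_eq_of_first (cs sub : List Char) (k : Nat) (h : sub <+: cs.drop k)
    (hnone : ∀ j < k, ¬ sub <+: cs.drop j) : PySem.Chars.find cs sub = (k : Int) := by
  obtain ⟨h0, hle⟩ := find_bounds_of_prefix_drop cs sub k h
  rcases Nat.lt_or_ge (PySem.Chars.find cs sub).toNat k with hlt | hge
  · exact absurd (PySem.Chars.find_spec h0).1 (hnone _ hlt)
  · omega

theorem len3 : ∀ c ∈ assetsList, c.toList.length = 3 := by decide
theorem otc_len3 : ("OTC" : String).toList.length = 3 := by decide
theorem otc_not_mem : ("OTC" : String) ∉ assetsList := by decide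

set_option maxHeartbeats 1000000 in
theorem scan_spec (info : String) (m : Nat) :
    (∀ c : String, c ∈ ((PySem.List.pyRange 0 (m : Int) 1).foldl (scanStep info) ([], false)).1 ↔
        c ∈ assetsList ∧ ∃ k < m, c.toList <+: info.toList.drop k) ∧
    ((PySem.List.pyRange 0 (m : Int) 1).foldl (scanStep info) ([], false)).1.Pairwise
        (fun x y => PySem.Chars.find info.toList x.toList < PySem.Chars.find info.toList y.toList) ∧
    (((PySem.List.pyRange 0 (m : Int) 1).foldl (scanStep info) ([], false)).2 = true ↔
        ∃ k < m, "OTC".toList <+: info.toList.drop k) := by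
  induction m with
  | zero =>
    rw [PySem.List.pyRange_one_eq_nil (by omega)]
    simp
  | succ m ih =>
    obtain ⟨ihmem, ihpw, ihotc⟩ := ih
    have hsplit : PySem.List.pyRange 0 ((m + 1 : Nat) : Int) 1
        = PySem.List.pyRange 0 (m : Int) 1 ++ [(m : Int)] := by
      push_cast
      exact PySem.List.pyRange_one_succ_right (by positivity)
    rw [hsplit, List.foldl_append]
    set st := (PySem.List.pyRange 0 (m : Int) 1).foldl (scanStep info) ([], false) with hst
    simp only [List.foldl_cons, List.foldl_nil, scanStep]
    by_cases hotc : PySem.Str.slice info (some (m : Int)) (some ((m : Int) + 3)) = "OTC"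
    · rw [if_pos hotc]
      dsimp only
      refine ⟨?_, ihpw, ?_⟩
      · intro c
        rw [ihmem c]
        constructor
        · rintro ⟨hca, k, hk, hp⟩; exact ⟨hca, k, by omega, hp⟩
        · rintro ⟨hca, k, hk, hp⟩
          refine ⟨hca, ?_⟩
          rcases Nat.lt_succ_iff_lt_or_eq.mp hk with hk' | rfl
          · exact ⟨k, hk', hp⟩
          · exfalso
            have := (window_eq_iff info c (len3 c hca) k).mpr hp
            rw [this] at hotc
            exact otc_not_mem (hotc ▸ hca)
      · constructor
        · intro _
          exact ⟨m, by omega, (window_eq_iff info "OTC" otc_len3 m).mp hotc⟩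
        · intro _; rfl
    · rw [if_neg hotc]
      by_cases hadd : PySem.Set.contains (PySem.Set.ofList assetsList)
          (PySem.Str.slice info (some (m : Int)) (some ((m : Int) + 3))) = true ∧
          PySem.Str.slice info (some (m : Int)) (some ((m : Int) + 3)) ∉ st.1
      · rw [if_pos hadd]
        dsimp only
        set w := PySem.Str.slice info (some (m : Int)) (some ((m : Int) + 3)) with hw
        have hwa : w ∈ assetsList := by
          have := (PySem.Set.contains_iff _ _).mp hadd.1
          rwa [PySem.Set.mem_ofList] at this
        have hwp : w.toList <+: info.toList.drop m := (window_eq_iff info w (len3 w hwa) m).mp rfl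
        have hwnot : ∀ j < m, ¬ w.toList <+: info.toList.drop j := by
          intro j hj hp
          exact hadd.2 ((ihmem w).mpr ⟨hwa, j, hj, hp⟩)
        have hwfind : PySem.Chars.find info.toList w.toList = (m : Int) :=
          find_eq_of_first _ _ _ hwp hwnot
        refine ⟨?_, ?_, ?_⟩
        · intro c
          simp only [List.mem_append, List.mem_singleton, ihmem c]
          constructor
          · rintro (⟨hca, k, hk, hp⟩ | rfl)
            · exact ⟨hca, k, by omega, hp⟩
            · exact ⟨hwa, m, by omega, hwp⟩
          · rintro ⟨hca, k, hk, hp⟩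
            rcases Nat.lt_succ_iff_lt_or_eq.mp hk with hk' | rfl
            · exact Or.inl ⟨hca, k, hk', hp⟩
            · right
              have := (window_eq_iff info c (len3 c hca) k).mpr hp
              exact this.symm
        · rw [List.pairwise_append]
          refine ⟨ihpw, List.pairwise_singleton _ _, ?_⟩
          intro x hx y hy
          rw [List.mem_singleton] at hy
          subst hy
          obtain ⟨hxa, k, hk, hp⟩ := (ihmem x).mp hx
          obtain ⟨h0, hle⟩ := find_bounds_of_prefix_drop info.toList x.toList k hp
          rw [hwfind]
          omega
        · rw [ihotc]
          constructor
          · rintro ⟨k, hk, hp⟩; exact ⟨k, by omega, hp⟩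
          · rintro ⟨k, hk, hp⟩
            rcases Nat.lt_succ_iff_lt_or_eq.mp hk with hk' | rfl
            · exact ⟨k, hk', hp⟩
            · exact absurd ((window_eq_iff info "OTC" otc_len3 k).mpr hp) hotc
      · rw [if_neg hadd]
        refine ⟨?_, ihpw, ?_⟩
        · intro c
          rw [ihmem c]
          constructor
          · rintro ⟨hca, k, hk, hp⟩; exact ⟨hca, k, by omega, hp⟩
          · rintro ⟨hca, k, hk, hp⟩
            refine ⟨hca, ?_⟩
            rcases Nat.lt_succ_iff_lt_or_eq.mp hk with hk' | rfl
            · exact ⟨k, hk', hp⟩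
            · have hcw := (window_eq_iff info c (len3 c hca) k).mpr hp
              rw [not_and_or] at hadd
              rcases hadd with h | h
              · exfalso
                apply h
                rw [PySem.Set.contains_iff, PySem.Set.mem_ofList, hcw]
                exact hca
              · rw [not_not] at h
                obtain ⟨_, j, hj, hpj⟩ := (ihmem _).mp h
                exact ⟨j, hj, hcw ▸ hpj⟩
        · rw [ihotc]
          constructor
          · rintro ⟨k, hk, hp⟩; exact ⟨k, by omega, hp⟩
          · rintro ⟨k, hk, hp⟩
            rcases Nat.lt_succ_iff_lt_or_eq.mp hk with hk' | rfl
            · exact ⟨k, hk', hp⟩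
            · exact absurd ((window_eq_iff info "OTC" otc_len3 k).mpr hp) hotc

theorem occurs_iff (info : String) (c : String) (hc : c.toList.length = 3) :
    (∃ k < info.toList.length - 2, c.toList <+: info.toList.drop k) ↔
      PySem.Str.isIn c info = true := by
  rw [PySem.Str.isIn_eq, ← PySem.Chars.exists_prefix_drop_iff_isIn]
  constructor
  · rintro ⟨k, _, h⟩; exact ⟨k, h⟩
  · rintro ⟨j, h⟩
    have hl := h.length_le
    rw [hc, List.length_drop] at hl
    exact ⟨j, by omega, h⟩

theorem filter_pair_aux {α : Type} [DecidableEq α] (r : α → α → Prop) [DecidableRel r]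
    (hasym : ∀ x y, r x y → ¬ r y x) (a b : α) :
    ∀ (l : List α), l.Pairwise r → b ∈ l → a ∉ l →
      l.filter (fun x => x = a ∨ x = b) = [b] := by
  intro l
  induction l with
  | nil => simp
  | cons y t ih =>
    intro hp hb ha
    rcases List.pairwise_cons.mp hp with ⟨hy, hpt⟩
    have hya : y ≠ a := fun h => ha (by simp [h])
    by_cases hyb : y = b
    · subst hyb
      have hbt : y ∉ t := fun h => hasym _ _ (hy _ h) (hy _ h)
      have hf : t.filter (fun x => x = a ∨ x = y) = [] := by
        rw [List.filter_eq_nil_iff]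
        intro x hx h
        rcases of_decide_eq_true h with rfl | rfl
        · exact ha (List.mem_cons_of_mem _ hx)
        · exact hbt hx
      rw [List.filter_cons_of_pos (by simp), hf]
    · rcases List.mem_cons.mp hb with h | hbt
      · exact absurd h.symm hyb
      rw [List.filter_cons_of_neg (by simp [hya, hyb])]
      exact ih hpt hbt (fun h => ha (List.mem_cons_of_mem _ h))

theorem filter_pair {α : Type} [DecidableEq α] (r : α → α → Prop) [DecidableRel r]
    (hasym : ∀ x y, r x y → ¬ r y x) (a b : α) :
    ∀ (l : List α), l.Pairwise r → a ∈ l → b ∈ l → a ≠ b →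
      l.filter (fun x => x = a ∨ x = b) = if r a b then [a, b] else [b, a] := by
  intro l
  induction l with
  | nil => simp
  | cons y t ih =>
    intro hp ha hb hab
    rcases List.pairwise_cons.mp hp with ⟨hy, hpt⟩
    have hyt : y ∉ t := fun h => hasym _ _ (hy _ h) (hy _ h)
    by_cases hya : y = a
    · subst hya
      have hbt : b ∈ t := by
        rcases List.mem_cons.mp hb with h | h
        · exact absurd h.symm hab
        · exact h
      rw [if_pos (hy _ hbt), List.filter_cons_of_pos (by simp),
        filter_pair_aux r hasym y b t hpt hbt hyt]
    · by_cases hyb : y = b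
      · subst hyb
        have hat : a ∈ t := by
          rcases List.mem_cons.mp ha with h | h
          · exact absurd h.symm hya
          · exact h
        rw [if_neg (hasym _ _ (hy _ hat)), List.filter_cons_of_pos (by simp)]
        have hf : t.filter (fun x => x = a ∨ x = y) = [a] := by
          rw [show (fun x => decide (x = a ∨ x = y)) = (fun x => decide (x = y ∨ x = a)) by
            funext x; simp [or_comm]]
          exact filter_pair_aux r hasym y a t hpt hat hyt
        rw [hf]
      · rw [List.filter_cons_of_neg (by simp [hya, hyb])]
        have hat : a ∈ t := by
          rcases List.mem_cons.mp ha with h | h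
          · exact absurd h.symm hya
          · exact h
        have hbt : b ∈ t := by
          rcases List.mem_cons.mp hb with h | h
          · exact absurd h.symm hyb
          · exact h
        exact ih hpt hat hbt hab

theorem join_two (x y : String) : PySem.Str.join "" [x, y] = x ++ y := by
  rw [← String.toList_inj, PySem.Str.toList_join]
  simp [PySem.Chars.join_cons_cons, PySem.Chars.join_singleton]

theorem B_char (info : String) :
    getAsset_alt info = (pickPair info).map (fun p => pairOut info p.1 p.2) := by
  have hrange : PySem.List.pyRange 0 (PySem.Str.len info - 2) 1
      = PySem.List.pyRange 0 ((info.toList.length - 2 : Nat) : Int) 1 := by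
    rw [PySem.Str.len_eq]
    by_cases h : 2 ≤ info.toList.length
    · congr 1; omega
    · rw [PySem.List.pyRange_one_eq_nil (by omega), PySem.List.pyRange_one_eq_nil (by omega)]
  unfold getAsset_alt
  rw [hrange]
  obtain ⟨ihmem, ihpw, ihotc⟩ := scan_spec info (info.toList.length - 2)
  set st := (PySem.List.pyRange 0 ((info.toList.length - 2 : Nat) : Int) 1).foldl
      (scanStep info) ([], false) with hst
  have mem_seen : ∀ c, c ∈ st.1 ↔ (c ∈ assetsList ∧ PySem.Str.isIn c info = true) := by
    intro c
    rw [ihmem c]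
    constructor
    · rintro ⟨hca, hex⟩
      exact ⟨hca, (occurs_iff info c (len3 c hca)).mp hex⟩
    · rintro ⟨hca, hin⟩
      exact ⟨hca, (occurs_iff info c (len3 c hca)).mpr hin⟩
  have otc_eq : st.2 = PySem.Str.isIn "OTC" info := by
    have h2 : st.2 = true ↔ PySem.Str.isIn "OTC" info = true :=
      ihotc.trans (occurs_iff info "OTC" otc_len3)
    cases hh : PySem.Str.isIn "OTC" info
    · cases hs : st.2
      · rfl
      · exact absurd (h2.mp hs) (by rw [hh]; simp)
    · exact h2.mpr hh
  have hnd : st.1.Nodup := by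
    refine ihpw.imp ?_
    intro x y h e
    subst e
    exact lt_irrefl _ h
  have hndA : assetsList.Nodup := by decide
  have hrk : List.Pairwise (fun x y : String =>
      ((PySem.List.index? assetsList x).getD 0 : Nat) < (PySem.List.index? assetsList y).getD 0)
      assetsList := by decide
  have hmemp : ∀ c, c ∈ assetsList.filter (fun c => PySem.Str.isIn c info) ↔
      (c ∈ assetsList ∧ PySem.Str.isIn c info = true) := by
    intro c; simp [List.mem_filter]
  have hperm : (assetsList.filter (fun c => PySem.Str.isIn c info)).Perm st.1 := by
    rw [List.perm_ext_iff_of_nodup (hndA.filter _) hnd]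
    intro c
    rw [hmemp c, mem_seen c]
  have hsorted : PySem.List.sorted st.1 (fun c => (PySem.List.index? assetsList c).getD 0) false
      = assetsList.filter (fun c => PySem.Str.isIn c info) :=
    PySem.List.sorted_eq_of_perm_of_pairwise_lt _ _ _ hperm (hrk.filter _)
  have hlen : st.1.length = (assetsList.filter (fun c => PySem.Str.isIn c info)).length :=
    hperm.length_eq.symm
  unfold pickPair
  dsimp only
  rw [hsorted]
  match hp : assetsList.filter (fun c => PySem.Str.isIn c info) with
  | [] =>
    rw [if_pos (by rw [hlen, hp]; simp)]
    rfl
  | [a] =>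
    rw [if_pos (by rw [hlen, hp]; simp)]
    rfl
  | a :: b :: t =>
    rw [if_neg (by rw [hlen, hp]; simp)]
    have hpA : (a :: b :: t).Nodup := hp ▸ hndA.filter _
    have hab : a ≠ b := by
      rcases List.nodup_cons.mp hpA with ⟨hna, _⟩
      exact fun e => hna (e ▸ List.mem_cons_self)
    have ha : a ∈ st.1 := (mem_seen a).mpr ((hmemp a).mp (hp ▸ List.mem_cons_self))
    have hb : b ∈ st.1 := (mem_seen b).mpr ((hmemp b).mp
      (hp ▸ List.mem_cons_of_mem _ List.mem_cons_self))
    have hslice : PySem.List.slice (a :: b :: t) none (some 2) = [a, b] := by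
      rw [PySem.List.slice_to _ (by norm_num)]
      rfl
    rw [hslice]
    have hpredeq : (fun c => decide (c ∈ [a, b])) = (fun x => decide (x = a ∨ x = b)) := by
      funext c
      simp [List.mem_cons]
    rw [hpredeq]
    have hasym : ∀ x y : String, (PySem.Chars.find info.toList x.toList
        < PySem.Chars.find info.toList y.toList) →
        ¬ (PySem.Chars.find info.toList y.toList < PySem.Chars.find info.toList x.toList) :=
      fun x y h h' => absurd h (not_lt.mpr h'.le)
    rw [filter_pair _ hasym a b st.1 ihpw ha hb hab, otc_eq]
    unfold pairOut
    simp only [PySem.Str.find_eq, Option.map_some]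
    split_ifs <;> simp [join_two]

-- ===== VERDICT (by name: the statement is the Claim_ definition above) =====
theorem getAsset_spec : Claim_equal_getAsset := by
  intro info _
  show getAsset info = getAsset_alt info
  rw [A_char, B_char]
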